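-- pv_equiv track=rewrite | github.com/JeannieFallon/aoc | 2015/01/01_1.py | get_target_floor
-- ===== SOURCE A (Python) =====
-- class Directions:
--     UP = '('
--     DOWN = ')'
--
-- def get_target_floor(directions: str):
--     floor = 0
--     for c in directions:
--         match c:
--             case Directions.UP:
--                 floor += 1
--             case Directions.DOWN:
--                 floor -= 1
--             case _:
--                 raise ValueError(f'Invalid direction: {c}')
--     return floor
-- ===== SOURCE B (Python) =====
-- def get_target_floor(directions: str):
--     for c in directions:
--         if c != '(' and c != ')':
--             raise ValueError(f'Invalid direction: {c}')
--     return directions.count('(') - directions.count(')')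
-- ===== Notes on version B (the rewrite author's own statement) =====
-- stated objective: alternative
-- what changed: Replaced A's single fused accumulate-per-character pass with an in-order validation loop followed by two str.count passes computing the net floor arithmetically.
import Mathlib
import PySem

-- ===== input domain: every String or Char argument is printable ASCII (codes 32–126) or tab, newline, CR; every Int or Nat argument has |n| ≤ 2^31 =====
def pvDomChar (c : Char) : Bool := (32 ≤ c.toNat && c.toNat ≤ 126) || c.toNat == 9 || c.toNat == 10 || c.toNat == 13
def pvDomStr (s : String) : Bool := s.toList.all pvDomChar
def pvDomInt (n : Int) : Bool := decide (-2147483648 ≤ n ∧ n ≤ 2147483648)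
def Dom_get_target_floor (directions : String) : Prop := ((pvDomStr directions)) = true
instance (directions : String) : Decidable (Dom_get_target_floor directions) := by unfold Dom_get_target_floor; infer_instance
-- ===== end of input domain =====

-- B replaces A's fused accumulate-per-character pass with a validation loop plus two count passes (alternative decomposition).


-- ===== PORT A =====
-- A's loop: floor starts at 0; each char adds/subtracts 1; any other char raises (→ none).
def getTargetFloorLoopA : List Char → Int → Option Int
  | [], floor => some floor
  | c :: rest, floor =>
      if c = '(' then getTargetFloorLoopA rest (floor + 1)
      else if c = ')' then getTargetFloorLoopA rest (floor - 1)
      else none  -- raise ValueError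

def get_target_floor (directions : String) : Int :=
  (getTargetFloorLoopA directions.toList 0).getD 0

-- ===== PORT B =====
-- B's validation loop: returns true iff no char raises (first invalid char would raise, in order).
def validDirectionsB : List Char → Bool
  | [] => true
  | c :: rest => if c ≠ '(' ∧ c ≠ ')' then false else validDirectionsB rest

def get_target_floor_alt (directions : String) : Int :=
  if validDirectionsB directions.toList then
    (PySem.Str.count directions "(" : Int) - (PySem.Str.count directions ")" : Int)
  else 0  -- raise ValueError

-- ===== PRECONDITION & SPEC =====
-- Pre_ excludes exactly the inputs on which A raises ValueError: any char other than '(' or ')'.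
def Pre_get_target_floor (directions : String) : Prop :=
  directions.toList.all (fun c => c == '(' || c == ')') = true
instance (directions : String) : Decidable (Pre_get_target_floor directions) := by
  unfold Pre_get_target_floor; infer_instance

def pvWitness_get_target_floor : String := "(())("

def Spec_get_target_floor (directions : String) (out : Int) : Prop := out = get_target_floor_alt directions
instance (directions : String) (out : Int) : Decidable (Spec_get_target_floor directions out) := by unfold Spec_get_target_floor; infer_instance

-- ===== CLAIM (what is proved, stated in full; the proofs are below) =====
def Claim_equal_get_target_floor : Prop := ∀ (directions : String), Dom_get_target_floor directions → Pre_get_target_floor directions → Spec_get_target_floor directions (get_target_floor directions)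

-- ===== LEMMAS AND PROOFS =====

lemma countGo_single (c : Char) : ∀ (fuel : Nat) (l : List Char) (acc : Nat),
    l.length ≤ fuel → PySem.Chars.count.go [c] fuel l acc = acc + l.count c := by
  intro fuel
  induction fuel with
  | zero =>
      intro l acc h
      have : l = [] := List.eq_nil_of_length_eq_zero (Nat.le_zero.mp h)
      subst this
      simp [PySem.Chars.count.go]
  | succ n ih =>
      intro l acc h
      cases l with
      | nil => simp [PySem.Chars.count.go]
      | cons a t =>
          rw [PySem.Chars.count.go]
          by_cases hc : a = c
          · subst hc
            rw [if_pos (by simp [List.isPrefixOf])]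
            simp only [List.length_cons] at h
            rw [ih _ _ (by simpa using h)]
            simp
            omega
          · rw [if_neg (by simp [List.isPrefixOf]; exact fun h' => hc h'.symm)]
            simp only [List.length_cons] at h
            rw [ih _ _ (by omega)]
            simp [hc]

lemma charsCount_single (s : List Char) (c : Char) :
    PySem.Chars.count s [c] = s.count c := by
  rw [PySem.Chars.count, if_neg (by simp)]
  simpa using countGo_single c s.length s 0 le_rfl

lemma loopA_valid (l : List Char) (h : l.all (fun c => c == '(' || c == ')') = true) (f : Int) :
    getTargetFloorLoopA l f = some (f + (l.count '(' : Int) - (l.count ')' : Int)) := by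
  induction l generalizing f with
  | nil => simp [getTargetFloorLoopA]
  | cons c rest ih =>
      simp only [List.all_cons, Bool.and_eq_true, Bool.or_eq_true, beq_iff_eq] at h
      rcases h with ⟨hc, hrest⟩
      rcases hc with hc | hc
      · subst hc
        rw [getTargetFloorLoopA, if_pos rfl, ih hrest]
        simp
        ring_nf
      · subst hc
        rw [getTargetFloorLoopA, if_neg (by decide), if_pos rfl, ih hrest]
        simp
        ring_nf

lemma validB_of_pre (l : List Char) (h : l.all (fun c => c == '(' || c == ')') = true) :
    validDirectionsB l = true := by
  induction l with
  | nil => rfl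
  | cons c rest ih =>
      simp only [List.all_cons, Bool.and_eq_true, Bool.or_eq_true, beq_iff_eq] at h
      rcases h with ⟨hc, hrest⟩
      rw [validDirectionsB]
      rcases hc with hc | hc <;> subst hc <;> simp [ih hrest]

-- ===== VERDICT (by name: the statement is the Claim_ definition above) =====
theorem get_target_floor_spec : Claim_equal_get_target_floor := by
  intro directions _ hpre
  unfold Spec_get_target_floor get_target_floor get_target_floor_alt
  rw [loopA_valid _ hpre, validB_of_pre _ hpre]
  rw [if_pos rfl, PySem.Str.count_eq, PySem.Str.count_eq]
  have h1 : ("(" : String).toList = ['('] := rfl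
  have h2 : (")" : String).toList = [')'] := rfl
  rw [h1, h2, charsCount_single, charsCount_single]
  simp
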